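-- pv_equiv track=rewrite | github.com/BigDataIA-Spring26-Team-03/TarrifIQ | agents/tools.py | _score_chunk_relevance
-- ===== SOURCE A (Python) =====
-- from typing import Any, Dict, List, Optional, Set, Tuple
--
-- def _score_chunk_relevance(
--     doc_number: str,
--     hts_code: str,
--     doc_hts_map: Dict[str, Set[str]],
-- ) -> int:
--     """
--     Score how specifically this document matches the queried HTS code.
--     4 = exact subheading match
--     3 = parent subheading match (e.g. 7217.10)
--     2 = heading match (e.g. 7217)
--     1 = chapter match only (e.g. 72)
--     0 = no match found
--     """
--     linked = doc_hts_map.get(doc_number, set())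
--     if not linked:
--         return 0
--
--     hc = hts_code.strip()
--     code_clean = hc.replace(".", "")
--     parts = hc.split(".")
--     chapter = code_clean[:2]
--
--     for lhts in linked:
--         if lhts.replace(".", "") == code_clean:
--             return 4
--
--     if len(parts) >= 2:
--         parent = ".".join(parts[:2])
--         for lhts in linked:
--             if lhts.startswith(parent):
--                 return 3
--
--     heading = parts[0]
--     for lhts in linked:
--         if lhts.startswith(heading):
--             return 2
--
--     for lhts in linked:
--         if lhts.replace(".", "")[:2] == chapter:
--             return 1
--
--     return 0
-- ===== SOURCE B (Python) =====
-- def _score_chunk_relevance(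
--     doc_number: str,
--     hts_code: str,
--     doc_hts_map,
-- ) -> int:
--     """Single pass: map each linked code to its best tier and keep the max."""
--     linked = doc_hts_map.get(doc_number, set())
--     hc = hts_code.strip()
--     code_clean = hc.replace(".", "")
--     parts = hc.split(".")
--     chapter = code_clean[:2]
--     parent = ".".join(parts[:2]) if len(parts) >= 2 else None
--     heading = parts[0]
--
--     best = 0
--     for lhts in linked:
--         lclean = lhts.replace(".", "")
--         if lclean == code_clean:
--             tier = 4
--         elif parent is not None and lhts.startswith(parent):
--             tier = 3
--         elif lhts.startswith(heading):
--             tier = 2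
--         elif lclean[:2] == chapter:
--             tier = 1
--         else:
--             tier = 0
--         best = max(best, tier)
--     return best
-- ===== Notes on version B (the rewrite author's own statement) =====
-- stated objective: alternative
-- what changed: Replaces A's four sequential early-return scans over the linked codes (plus the empty-set early return) with a single fold that assigns each linked code its best tier via one elif chain and keeps the running maximum.
import Mathlib
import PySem

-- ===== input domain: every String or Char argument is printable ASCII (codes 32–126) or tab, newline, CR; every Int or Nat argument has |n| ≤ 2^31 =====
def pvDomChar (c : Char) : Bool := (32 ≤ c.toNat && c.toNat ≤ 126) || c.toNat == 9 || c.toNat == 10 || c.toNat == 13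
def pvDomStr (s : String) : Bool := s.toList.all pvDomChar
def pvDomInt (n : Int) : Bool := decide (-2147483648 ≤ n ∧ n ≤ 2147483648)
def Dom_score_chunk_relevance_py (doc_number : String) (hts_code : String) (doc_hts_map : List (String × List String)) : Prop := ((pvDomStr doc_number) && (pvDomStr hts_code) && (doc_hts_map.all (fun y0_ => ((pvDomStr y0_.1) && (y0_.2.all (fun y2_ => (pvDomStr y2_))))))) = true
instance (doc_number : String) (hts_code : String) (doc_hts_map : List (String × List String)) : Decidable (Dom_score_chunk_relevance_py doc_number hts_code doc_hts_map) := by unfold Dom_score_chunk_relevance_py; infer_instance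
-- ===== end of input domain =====

-- B replaces A's four sequential scans over the linked codes by a single pass that
-- takes the max of each code's tier (alternative decomposition; same asymptotic cost).


-- ===== PORT A =====
-- literal port of _score_chunk_relevance: four sequential scans with early return
-- (a `for … return k` loop is `linked.any`; the guarded third loop is one condition).
-- `hc.split(".")`: sep "." ≠ "", so Str.split? always returns some; `.getD []` is exact.
-- `parts[0]`: split never yields an empty list, so `headI` is exact here.
def score_chunk_relevance_py (doc_number : String) (hts_code : String) (doc_hts_map : List (String × List String)) : Int :=
  let linked := (PySem.Dict.mk doc_hts_map).getD doc_number []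
  if linked = [] then 0
  else
    let hc := PySem.Str.strip hts_code
    let code_clean := PySem.Str.replace hc "." ""
    let parts := (PySem.Str.split? hc ".").getD []
    let chapter := PySem.Str.slice code_clean none (some 2)
    if linked.any (fun lhts => PySem.Str.replace lhts "." "" == code_clean) then 4
    else if decide (2 ≤ parts.length) &&
        linked.any (fun lhts => PySem.Str.startswith lhts (PySem.Str.join "." (PySem.List.slice parts none (some 2)))) then 3
    else if linked.any (fun lhts => PySem.Str.startswith lhts parts.headI) then 2
    else if linked.any (fun lhts => PySem.Str.slice (PySem.Str.replace lhts "." "") none (some 2) == chapter) then 1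
    else 0

-- ===== PORT B =====
-- literal port of Source B: one fold over linked, max of the per-element tier (elif chain).
def score_chunk_relevance_py_alt (doc_number : String) (hts_code : String) (doc_hts_map : List (String × List String)) : Int :=
  let linked := (PySem.Dict.mk doc_hts_map).getD doc_number []
  let hc := PySem.Str.strip hts_code
  let code_clean := PySem.Str.replace hc "." ""
  let parts := (PySem.Str.split? hc ".").getD []
  let chapter := PySem.Str.slice code_clean none (some 2)
  let parent? : Option String :=
    if decide (2 ≤ parts.length) then some (PySem.Str.join "." (PySem.List.slice parts none (some 2))) else none
  let heading := parts.headI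
  linked.foldl (fun best lhts =>
    let lclean := PySem.Str.replace lhts "." ""
    let tier : Int :=
      if lclean == code_clean then 4
      else if (match parent? with | some p => PySem.Str.startswith lhts p | none => false) then 3
      else if PySem.Str.startswith lhts heading then 2
      else if PySem.Str.slice lclean none (some 2) == chapter then 1
      else 0
    max best tier) 0

-- ===== PRECONDITION & SPEC =====
def Spec_score_chunk_relevance_py (doc_number : String) (hts_code : String) (doc_hts_map : List (String × List String)) (out : Int) : Prop := out = score_chunk_relevance_py_alt doc_number hts_code doc_hts_map
instance (doc_number : String) (hts_code : String) (doc_hts_map : List (String × List String)) (out : Int) : Decidable (Spec_score_chunk_relevance_py doc_number hts_code doc_hts_map out) := by unfold Spec_score_chunk_relevance_py; infer_instance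

-- ===== CLAIM (what is proved, stated in full; the proofs are below) =====
def Claim_equal_score_chunk_relevance_py : Prop := ∀ (doc_number : String) (hts_code : String) (doc_hts_map : List (String × List String)), Dom_score_chunk_relevance_py doc_number hts_code doc_hts_map → Spec_score_chunk_relevance_py doc_number hts_code doc_hts_map (score_chunk_relevance_py doc_number hts_code doc_hts_map)

-- ===== LEMMAS AND PROOFS =====

/-- Folding `max` with a nonnegative per-element tier: the accumulator factors out. -/
theorem pv_foldl_max_shift (t : String → Int) :
    ∀ (l : List String) (b : Int), 0 ≤ b →
      l.foldl (fun a x => max a (t x)) b = max b (l.foldl (fun a x => max a (t x)) 0) := by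
  intro l
  induction l with
  | nil => intro b hb; simp; omega
  | cons x xs ih =>
    intro b hb
    have h1 : (0 : Int) ≤ max b (t x) := le_trans hb (le_max_left _ _)
    have h2 : (0 : Int) ≤ max 0 (t x) := le_max_left _ _
    simp only [List.foldl_cons]
    rw [ih (max b (t x)) h1, ih (max 0 (t x)) h2]
    omega

/-- One cons step of the chain/fold correspondence, as a pure Boolean fact. -/
theorem pv_step (a4 a3 a2 a1 b4 b3 b2 b1 : Bool) :
    (if (a4 || b4) then (4 : Int) else if (a3 || b3) then 3 else if (a2 || b2) then 2 else if (a1 || b1) then 1 else 0)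
    = max (max 0 (if a4 then (4 : Int) else if a3 then 3 else if a2 then 2 else if a1 then 1 else 0))
          (if b4 then (4 : Int) else if b3 then 3 else if b2 then 2 else if b1 then 1 else 0) := by
  revert a4 a3 a2 a1 b4 b3 b2 b1; decide

/-- The four-scan early-return chain equals a single max-of-tiers fold. -/
theorem pv_chain_eq_fold (p4 p3 p2 p1 : String → Bool) :
    ∀ (l : List String),
      (if l.any p4 then (4 : Int)
       else if l.any p3 then 3
       else if l.any p2 then 2
       else if l.any p1 then 1
       else 0)
      = l.foldl (fun a x => max a
          (if p4 x then (4 : Int) else if p3 x then 3 else if p2 x then 2 else if p1 x then 1 else 0)) 0 := by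
  intro l
  induction l with
  | nil => simp
  | cons x xs ih =>
    simp only [List.foldl_cons]
    rw [pv_foldl_max_shift _ xs _ (le_max_left 0 _), ← ih]
    simp only [List.any_cons]
    exact pv_step (p4 x) (p3 x) (p2 x) (p1 x) (xs.any p4) (xs.any p3) (xs.any p2) (xs.any p1)

/-- Both port bodies, fully parameterised by the precomputed locals. -/
theorem pv_core (linked : List String) (code_clean chapter parent heading : String) (hasP : Bool) :
    (if linked = [] then (0 : Int)
     else if linked.any (fun lhts => PySem.Str.replace lhts "." "" == code_clean) then 4
     else if hasP && linked.any (fun lhts => PySem.Str.startswith lhts parent) then 3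
     else if linked.any (fun lhts => PySem.Str.startswith lhts heading) then 2
     else if linked.any (fun lhts => PySem.Str.slice (PySem.Str.replace lhts "." "") none (some 2) == chapter) then 1
     else 0)
    = linked.foldl (fun best lhts =>
        max best
          (if PySem.Str.replace lhts "." "" == code_clean then (4 : Int)
           else if (match (if hasP then some parent else none : Option String) with
                    | some p => PySem.Str.startswith lhts p
                    | none => false) then 3
           else if PySem.Str.startswith lhts heading then 2
           else if PySem.Str.slice (PySem.Str.replace lhts "." "") none (some 2) == chapter then 1
           else 0)) 0 := by
  by_cases hnil : linked = []
  · subst hnil; simp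
  · rw [if_neg hnil]
    have hany : linked.any (fun lhts => hasP && PySem.Str.startswith lhts parent)
        = (hasP && linked.any (fun lhts => PySem.Str.startswith lhts parent)) := by
      cases hasP <;> simp
    rw [← hany,
        pv_chain_eq_fold (fun lhts => PySem.Str.replace lhts "." "" == code_clean)
          (fun lhts => hasP && PySem.Str.startswith lhts parent)
          (fun lhts => PySem.Str.startswith lhts heading)
          (fun lhts => PySem.Str.slice (PySem.Str.replace lhts "." "") none (some 2) == chapter) linked]
    cases hasP <;> simp

-- ===== VERDICT (by name: the statement is the Claim_ definition above) =====
theorem score_chunk_relevance_py_spec : Claim_equal_score_chunk_relevance_py := by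
  intro doc_number hts_code doc_hts_map _
  unfold Spec_score_chunk_relevance_py
  unfold score_chunk_relevance_py score_chunk_relevance_py_alt
  exact pv_core ((PySem.Dict.mk doc_hts_map).getD doc_number [])
    (PySem.Str.replace (PySem.Str.strip hts_code) "." "")
    (PySem.Str.slice (PySem.Str.replace (PySem.Str.strip hts_code) "." "") none (some 2))
    (PySem.Str.join "." (PySem.List.slice ((PySem.Str.split? (PySem.Str.strip hts_code) ".").getD []) none (some 2)))
    ((PySem.Str.split? (PySem.Str.strip hts_code) ".").getD []).headI
    (decide (2 ≤ ((PySem.Str.split? (PySem.Str.strip hts_code) ".").getD []).length))
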